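-- pv_equiv track=rewrite | github.com/LukaSchnauzer/prueba-tecnica-2 | AnswerLesson.py | validateGivenAnswers
-- ===== SOURCE A (Python) =====
-- def validateGivenAnswers(correct_answers,given_answer,allCorrectRequired):
--     if(allCorrectRequired):
--         for ca in correct_answers:
--             #Each correct answer must be on the given answers
--             if(ca not in given_answer):
--                 #One of the correct answers is not given, the answer is wrong
--                 return False
--         return True
--     else:
--         value = False
--         for ga in given_answer:
--             #If a single given answer is on the correct_aswers list, then it is correct
--             #However if the answer also includes a wrong answer, then the answer is wrong
--             if(ga in correct_answers):
--                 #A Correct answer was given, so for now we set True, while we validate the rest of the answers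
--                 value = True
--             else:
--                 #A wrong answer was given
--                 return False
--         return value
-- ===== SOURCE B (Python) =====
-- def validateGivenAnswers(correct_answers, given_answer, allCorrectRequired):
--     # Sort both lists once, then decide the required subset relation with a
--     # single linear two-pointer merge scan instead of repeated membership tests.
--     if allCorrectRequired:
--         return _sorted_subset(sorted(correct_answers), sorted(given_answer))
--     return bool(given_answer) and _sorted_subset(sorted(given_answer), sorted(correct_answers))
--
--
-- def _sorted_subset(xs, ys):
--     # xs, ys ascending; True iff every value occurring in xs also occurs in ys
--     i = 0
--     n = len(ys)
--     for x in xs: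
--         while i < n and ys[i] < x:
--             i += 1
--         if i == n or ys[i] != x:
--             return False
--     return True
-- ===== Notes on version B (the rewrite author's own statement) =====
-- stated objective: alternative
-- what changed: Replaced A's per-element membership loops (early return / running flag) by a sort-then-merge algorithm: both lists are sorted once and the needed subset relation is decided by a single two-pointer linear scan over the two sorted lists.
import Mathlib
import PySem

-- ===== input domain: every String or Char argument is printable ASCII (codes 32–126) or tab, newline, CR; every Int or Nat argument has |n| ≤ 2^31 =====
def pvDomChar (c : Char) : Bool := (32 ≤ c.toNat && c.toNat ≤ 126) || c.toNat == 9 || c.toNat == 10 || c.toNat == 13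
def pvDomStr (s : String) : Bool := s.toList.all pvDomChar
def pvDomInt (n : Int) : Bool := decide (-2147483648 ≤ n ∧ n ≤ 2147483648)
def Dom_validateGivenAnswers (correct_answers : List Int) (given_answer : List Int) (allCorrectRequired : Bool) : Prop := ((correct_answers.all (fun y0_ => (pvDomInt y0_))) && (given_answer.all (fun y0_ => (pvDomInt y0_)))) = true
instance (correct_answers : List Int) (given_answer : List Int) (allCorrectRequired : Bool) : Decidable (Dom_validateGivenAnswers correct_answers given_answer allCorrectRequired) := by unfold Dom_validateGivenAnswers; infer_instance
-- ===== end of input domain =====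

-- B replaces A's per-element membership loops by sort-then-merge: sort both lists once,
-- then decide the subset relation with a single two-pointer scan; same values everywhere.
-- ===== PORT A =====
-- 'for ca in correct_answers: if ca not in given_answer: return False / return True'
def vgaAllLoop (given_answer : List Int) : List Int → Bool
  | [] => true
  | ca :: rest => if given_answer.contains ca then vgaAllLoop given_answer rest else false

-- 'value = False; for ga in given_answer: …; return value'
def vgaAnyLoop (correct_answers : List Int) (value : Bool) : List Int → Bool
  | [] => value
  | ga :: rest => if correct_answers.contains ga then vgaAnyLoop correct_answers true rest else false

def validateGivenAnswers (correct_answers : List Int) (given_answer : List Int) (allCorrectRequired : Bool) : Bool :=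
  if allCorrectRequired then vgaAllLoop given_answer correct_answers
  else vgaAnyLoop correct_answers false given_answer

-- ===== PORT B =====
-- Source B's _sorted_subset: the outer for over xs with the inner while advancing the
-- pointer into ys becomes a recursion consuming ys's head while it is < x.
def sortedSubset : List Int → List Int → Bool
  | [], _ => true
  | _ :: _, [] => false
  | x :: xs, y :: ys =>
      if y < x then sortedSubset (x :: xs) ys          -- inner while: i += 1
      else if y = x then sortedSubset xs (y :: ys)     -- matched, next x, pointer kept
      else false                                       -- ys[i] != x
  termination_by xs ys => xs.length + ys.length

def validateGivenAnswers_alt (correct_answers : List Int) (given_answer : List Int) (allCorrectRequired : Bool) : Bool :=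
  if allCorrectRequired then
    sortedSubset (PySem.List.sorted correct_answers (fun x => x) false)
                 (PySem.List.sorted given_answer (fun x => x) false)
  else
    !given_answer.isEmpty &&
    sortedSubset (PySem.List.sorted given_answer (fun x => x) false)
                 (PySem.List.sorted correct_answers (fun x => x) false)

-- ===== PRECONDITION & SPEC =====
def Spec_validateGivenAnswers (correct_answers : List Int) (given_answer : List Int) (allCorrectRequired : Bool) (out : Bool) : Prop := out = validateGivenAnswers_alt correct_answers given_answer allCorrectRequired
instance (correct_answers : List Int) (given_answer : List Int) (allCorrectRequired : Bool) (out : Bool) : Decidable (Spec_validateGivenAnswers correct_answers given_answer allCorrectRequired out) := by unfold Spec_validateGivenAnswers; infer_instance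

-- ===== CLAIM =====
def Claim_equal_validateGivenAnswers : Prop := ∀ (correct_answers : List Int) (given_answer : List Int) (allCorrectRequired : Bool), Dom_validateGivenAnswers correct_answers given_answer allCorrectRequired → Spec_validateGivenAnswers correct_answers given_answer allCorrectRequired (validateGivenAnswers correct_answers given_answer allCorrectRequired)

-- ===== LEMMAS AND PROOFS =====
theorem vgaAllLoop_eq (ga : List Int) (ca : List Int) :
    vgaAllLoop ga ca = ca.all ga.contains := by
  induction ca with
  | nil => rfl
  | cons c rest ih => simp [vgaAllLoop, ih, List.all_cons]

theorem vgaAnyLoop_eq (ca : List Int) (v : Bool) (ga : List Int) :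
    vgaAnyLoop ca v ga = (ga.all ca.contains && (v || !ga.isEmpty)) := by
  induction ga generalizing v with
  | nil => simp [vgaAnyLoop]
  | cons g rest ih => simp [vgaAnyLoop, ih, List.all_cons]

-- on ascending lists the two-pointer scan decides the membership subset relation
theorem sortedSubset_eq_all (xs ys : List Int)
    (hxs : xs.Pairwise (· ≤ ·)) (hys : ys.Pairwise (· ≤ ·)) :
    sortedSubset xs ys = xs.all ys.contains := by
  induction xs generalizing ys with
  | nil => simp [sortedSubset]
  | cons x xs ih =>
    induction ys with
    | nil => simp [sortedSubset]
    | cons y ys ihy =>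
      rw [sortedSubset]
      rcases lt_trichotomy y x with hlt | heq | hgt
      · -- y < x: y occurs in neither x nor (by sortedness) any later element of x::xs
        rw [if_pos hlt, ihy hys.of_cons]
        have hne : ∀ a ∈ x :: xs, a ≠ y := by
          intro a ha
          rcases List.mem_cons.mp ha with rfl | ha
          · omega
          · have := (List.pairwise_cons.mp hxs).1 a ha; omega
        rw [Bool.eq_iff_iff]
        simp only [List.all_eq_true, List.contains_eq_mem, decide_eq_true_eq, List.mem_cons]
        constructor
        · intro h a ha; exact Or.inr (h a ha)
        · intro h a ha
          rcases h a ha with rfl | hm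
          · exact absurd rfl (hne a (List.mem_cons.mpr ha))
          · exact hm
      · -- y = x
        subst heq
        rw [if_neg (lt_irrefl _), if_pos rfl, ih _ hxs.of_cons hys]
        simp [List.all_cons]
      · -- x < y: x is smaller than everything in y::ys, so not contained
        rw [if_neg (by omega), if_neg (by omega)]
        have hx : x ∉ y :: ys := by
          intro hx
          rcases List.mem_cons.mp hx with rfl | hx
          · omega
          · have := (List.pairwise_cons.mp hys).1 x hx; omega
        simp [List.all_cons, List.contains_eq_mem, hx]

theorem sortedSubset_sorted_eq (xs ys : List Int) :
    sortedSubset (PySem.List.sorted xs (fun x => x) false) (PySem.List.sorted ys (fun x => x) false)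
      = xs.all ys.contains := by
  rw [sortedSubset_eq_all _ _ (PySem.List.sorted_pairwise xs (fun x => x))
        (PySem.List.sorted_pairwise ys (fun x => x))]
  rw [Bool.eq_iff_iff]
  simp only [List.all_eq_true, List.contains_eq_mem, decide_eq_true_eq,
    PySem.List.mem_sorted]

-- ===== VERDICT =====
theorem validateGivenAnswers_spec : Claim_equal_validateGivenAnswers := by
  intro ca ga req _
  unfold Spec_validateGivenAnswers validateGivenAnswers validateGivenAnswers_alt
  cases req with
  | true => simp [vgaAllLoop_eq, sortedSubset_sorted_eq]
  | false => simp [vgaAnyLoop_eq, sortedSubset_sorted_eq, Bool.and_comm]
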